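-- pv_equiv track=rewrite | github.com/Kuhnhee/TIL | algorithm/algorithm_challenges/SWEA/swea_1112_2383.py | simulator
-- ===== SOURCE A (Python) =====
-- def manhattan(coord1, coord2):
--     return abs(coord1[0]-coord2[0]) + abs(coord1[1]-coord2[1])
--
-- def simulator(group, target):
--     dists = []
--     for coord in group:
--         dists.append(manhattan(coord, target[:2]))
--     dists.sort()
--
--     timer, length, queue_limit = 0, target[2], 3
--     queue, wait = [], []
--     while (dists or queue or wait):
--         timer += 1
--         #계단 내려감
--         for idx in range(len(queue)):
--             queue[idx] -= 1
--         while queue and queue[0] == 0: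
--             queue.pop(0)
--
--         #대기열에 있는 사람 출발
--         while wait and len(queue) < queue_limit:
--             queue.append(wait.pop(0))
--
--         #계단을 향해서 이동
--         for idx in range(len(dists)):
--             dists[idx] -= 1
--             if dists[idx] == 0:
--                 wait.append(length)
--         while dists and dists[0] == 0:
--             dists.pop(0)
--     return timer
-- ===== SOURCE B (Python) =====
-- def simulator(group, target):
--     # Event-driven: sorted arrivals through a capacity-3, uniform-duration stairway.
--     # Person i (in sorted distance order) can step on at d_i+1, or when person i-3
--     # has finished (entry[i-3] + length); answer is the last finish time.
--     if not group:
--         return 0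
--     tx, ty, length = target[0], target[1], target[2]
--     dists = sorted(abs(c[0] - tx) + abs(c[1] - ty) for c in group)
--     entries = []
--     for i, d in enumerate(dists):
--         e = d + 1
--         if i >= 3 and entries[i - 3] + length > e:
--             e = entries[i - 3] + length
--         entries.append(e)
--     return entries[-1] + length
-- ===== Notes on version B (the rewrite author's own statement) =====
-- stated objective: faster
-- what changed: A simulates the descent tick by tick, decrementing every person's distance and every stair counter each second; B sorts the arrival times once and computes each person's stair-entry time by the event-driven recurrence entry[i] = max(dist[i]+1, entry[i-3]+length) (capacity-3, uniform duration), returning the last finish time.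
import Mathlib
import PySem

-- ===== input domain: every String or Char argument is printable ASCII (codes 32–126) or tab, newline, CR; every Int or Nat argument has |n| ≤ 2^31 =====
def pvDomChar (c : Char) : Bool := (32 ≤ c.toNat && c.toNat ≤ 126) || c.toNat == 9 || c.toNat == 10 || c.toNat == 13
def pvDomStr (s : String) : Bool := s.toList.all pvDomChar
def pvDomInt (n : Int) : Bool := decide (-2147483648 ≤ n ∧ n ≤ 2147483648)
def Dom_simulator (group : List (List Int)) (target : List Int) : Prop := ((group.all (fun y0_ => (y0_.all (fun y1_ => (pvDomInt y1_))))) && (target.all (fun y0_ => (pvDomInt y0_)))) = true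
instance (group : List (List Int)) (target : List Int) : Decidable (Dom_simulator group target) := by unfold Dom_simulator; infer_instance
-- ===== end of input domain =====

-- B is an event-driven reformulation (sorted arrivals through a capacity-3 uniform-duration
-- resource, 3-back entry recurrence) of A's tick-by-tick simulation; return value only.

-- ===== PORT A =====
-- manhattan(coord1, coord2); indexing via getD: Pre_ admits only coords/targets long enough,
-- so the default is never consulted on admitted inputs.
def manhattanA (coord1 coord2 : List Int) : Int :=
  |coord1.getD 0 0 - coord2.getD 0 0| + |coord1.getD 1 0 - coord2.getD 1 0|

-- `while queue and queue[0] == 0: queue.pop(0)`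
def popzA : List Int → List Int
  | [] => []
  | x :: xs => if x = 0 then popzA xs else x :: xs

-- `while wait and len(queue) < queue_limit: queue.append(wait.pop(0))`
def transferA : List Int → List Int → List Int × List Int
  | queue, [] => (queue, [])
  | queue, w :: ws =>
    if queue.length < 3 then transferA (queue ++ [w]) ws else (queue, w :: ws)

-- `for idx in range(len(dists)): dists[idx] -= 1; if dists[idx]==0: wait.append(length)`
def stepDistsA (L : Int) (dists wait : List Int) : List Int × List Int :=
  dists.foldl (fun p x => (p.1 ++ [x - 1], if x - 1 = 0 then p.2 ++ [L] else p.2)) ([], wait)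

-- the `while (dists or queue or wait)` loop; fuel only makes it total (A diverges
-- outside Pre_); under Pre_ the fuel passed below is proved sufficient.
def loopA (L : Int) : Nat → Int → List Int → List Int → List Int → Int
  | 0, timer, _, _, _ => timer
  | f + 1, timer, dists, queue, wait =>
    if dists = [] ∧ queue = [] ∧ wait = [] then timer
    else
      let timer := timer + 1
      let queue := popzA (queue.map (· - 1))
      let qw := transferA queue wait
      let dw := stepDistsA L dists qw.2
      loopA L f timer (popzA dw.1) qw.1 dw.2

def simulator (group : List (List Int)) (target : List Int) : Int :=
  let dists := PySem.List.sorted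
    (group.map (fun coord => manhattanA coord (PySem.List.slice target (some 0) (some 2))))
    (fun x => x) false
  let L := target.getD 2 0
  loopA L ((dists.map Int.natAbs).sum + (dists.length + 1) * L.natAbs + 1) 0 dists [] []

-- ===== PORT B =====
def simulator_alt (group : List (List Int)) (target : List Int) : Int :=
  if group = [] then 0
  else
    let tx := target.getD 0 0
    let ty := target.getD 1 0
    let L := target.getD 2 0
    let dists := PySem.List.sorted
      (group.map (fun c => |c.getD 0 0 - tx| + |c.getD 1 0 - ty|)) (fun x => x) false
    let es := (PySem.List.enumerate dists 0).foldl
      (fun es p =>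
        let e := p.2 + 1
        let e := if 3 ≤ p.1 ∧ e < es.getD (p.1 - 3).toNat 0 + L then es.getD (p.1 - 3).toNat 0 + L else e
        es ++ [e]) []
    es.getD (es.length - 1) 0 + L

-- ===== PRECONDITION & SPEC =====
-- Pre_ excludes exactly the inputs on which A does not return: short target/coord lists
-- (IndexError) and inputs with a zero manhattan distance or a non-positive stair length,
-- on which A's while loop never terminates.
def Pre_simulator (group : List (List Int)) (target : List Int) : Prop :=
  3 ≤ target.length ∧ 1 ≤ target.getD 2 0 ∧
  ∀ c ∈ group, 2 ≤ c.length ∧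
    1 ≤ |c.getD 0 0 - target.getD 0 0| + |c.getD 1 0 - target.getD 1 0|
instance (group : List (List Int)) (target : List Int) : Decidable (Pre_simulator group target) := by
  unfold Pre_simulator; infer_instance

def pvWitness_simulator : List (List Int) × List Int := ([[1, 0], [0, 2], [3, 3], [1, 1]], [0, 0, 3])

def Spec_simulator (group : List (List Int)) (target : List Int) (out : Int) : Prop :=
  out = simulator_alt group target
instance (group : List (List Int)) (target : List Int) (out : Int) : Decidable (Spec_simulator group target out) := by
  unfold Spec_simulator; infer_instance

-- ===== CLAIM (what is proved, stated in full; the proofs are below) =====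
def Claim_equal_simulator : Prop := ∀ (group : List (List Int)) (target : List Int), Dom_simulator group target → Pre_simulator group target → Spec_simulator group target (simulator group target)
-- ===== LEMMAS AND PROOFS =====

-- d i = sorted distance list entry i (0 beyond the end)
def dOf (ds : List Int) (i : Nat) : Int := ds.getD i 0

-- entry times: person i steps onto the stairs at Ent i = max (d i + 1) (Ent (i-3) + L)
def Ent (ds : List Int) (L : Int) : Nat → Int
  | i => if 3 ≤ i then max (dOf ds i + 1) (Ent ds L (i - 3) + L) else dOf ds i + 1
  termination_by i => i
  decreasing_by omega

-- counters: how many persons have arrived (a), entered (b), finished (c) by time t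
def aC (ds : List Int) (t : Int) : Nat := (List.range ds.length).countP (fun i => decide (dOf ds i ≤ t))
def bC (ds : List Int) (L : Int) (t : Int) : Nat := (List.range ds.length).countP (fun i => decide (Ent ds L i ≤ t))
def cC (ds : List Int) (L : Int) (t : Int) : Nat := (List.range ds.length).countP (fun i => decide (Ent ds L i + L ≤ t))

-- the simulated state after t ticks
def distsSt (ds : List Int) (t : Nat) : List Int := (ds.drop (aC ds t)).map (· - (t : Int))
def waitSt (ds : List Int) (L : Int) (t : Nat) : List Int := List.replicate (aC ds (t : Int) - bC ds L (t : Int)) L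
def queueSt (ds : List Int) (L : Int) (t : Nat) : List Int :=
  (List.range' (cC ds L (t : Int)) (bC ds L (t : Int) - cC ds L (t : Int))).map (fun i => Ent ds L i + L - (t : Int))

lemma dc_filter (n : Nat) (p : Nat → Bool) (hdc : ∀ i j, i ≤ j → j < n → p j = true → p i = true) :
    (List.range n).filter p = List.range ((List.range n).countP p) := by
  induction n with
  | zero => simp
  | succ n ih =>
    rw [List.range_succ, List.filter_append, List.countP_append]
    by_cases hp : p n = true
    · have hall : ∀ i ∈ List.range n, p i = true := by
        intro i hi
        exact hdc i n (by simp at hi; omega) (by omega) hp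
      rw [List.filter_eq_self.mpr hall, List.countP_eq_length.mpr hall]
      simp [hp, List.range_succ]
    · have hpf : p n = false := by simpa using hp
      have h1 : List.filter p [n] = [] := by simp [List.filter, hpf]
      have h2 : List.countP p [n] = 0 := by simp [List.countP, List.countP.go, hpf]
      rw [h1, h2, List.append_nil, Nat.add_zero]
      exact ih (fun i j hij hj hpj => hdc i j hij (by omega) hpj)

lemma count_char (n : Nat) (p : Nat → Bool) (hdc : ∀ i j, i ≤ j → j < n → p j = true → p i = true)
    (i : Nat) (hi : i < n) : (p i = true ↔ i < (List.range n).countP p) := by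
  have h := dc_filter n p hdc
  constructor
  · intro hp
    have hmem : i ∈ List.filter p (List.range n) := by
      simp [List.mem_filter, hp, List.mem_range, hi]
    rw [h] at hmem; simpa using hmem
  · intro hlt
    have hmem : i ∈ List.range ((List.range n).countP p) := by simpa using hlt
    rw [← h] at hmem
    exact (List.mem_filter.mp hmem).2

lemma dOf_eq (ds : List Int) (i : Nat) (hi : i < ds.length) : dOf ds i = ds[i] :=
  List.getD_eq_getElem ds 0 hi

lemma dMono (ds : List Int) (hs : List.Pairwise (· ≤ ·) ds) (i j : Nat) (hij : i ≤ j)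
    (hj : j < ds.length) : dOf ds i ≤ dOf ds j := by
  rcases Nat.eq_or_lt_of_le hij with rfl | h
  · exact le_rfl
  · have hg := List.pairwise_iff_getElem.mp hs i j (by omega) hj h
    rw [dOf_eq ds i (by omega), dOf_eq ds j hj]
    exact hg

lemma dPos (ds : List Int) (hd1 : ∀ x ∈ ds, 1 ≤ x) (i : Nat) (hi : i < ds.length) :
    1 ≤ dOf ds i := by
  rw [dOf_eq ds i hi]
  exact hd1 _ (ds.getElem_mem hi)

lemma ent_lb (ds : List Int) (L : Int) (i : Nat) : dOf ds i + 1 ≤ Ent ds L i := by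
  rw [Ent]
  split
  · exact le_max_left _ _
  · exact le_rfl

lemma ent_step (ds : List Int) (L : Int) (i : Nat) (h3 : 3 ≤ i) :
    Ent ds L (i - 3) + L ≤ Ent ds L i := by
  conv_rhs => rw [Ent]
  rw [if_pos h3]
  exact le_max_right _ _

lemma ent_mono (ds : List Int) (L : Int) (hs : List.Pairwise (· ≤ ·) ds) :
    ∀ j, j < ds.length → ∀ i, i ≤ j → Ent ds L i ≤ Ent ds L j := by
  intro j
  induction j using Nat.strong_induction_on with
  | _ j ih =>
    intro hj i hij
    rcases Nat.eq_or_lt_of_le hij with rfl | hlt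
    · exact le_rfl
    by_cases h3j : 3 ≤ j
    · have hER : Ent ds L j = max (dOf ds j + 1) (Ent ds L (j - 3) + L) := by
        rw [Ent]; simp [h3j]
      by_cases h3i : 3 ≤ i
      · have hEI : Ent ds L i = max (dOf ds i + 1) (Ent ds L (i - 3) + L) := by
          rw [Ent]; simp [h3i]
        rw [hEI, hER]
        apply max_le_max
        · have := dMono ds hs i j hij hj; omega
        · have := ih (j - 3) (by omega) (by omega) (i - 3) (by omega); omega
      · have hEI : Ent ds L i = dOf ds i + 1 := by rw [Ent]; simp [h3i]
        rw [hEI, hER]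
        have := dMono ds hs i j hij hj
        exact le_max_of_le_left (by omega)
    · have h3i : ¬ 3 ≤ i := by omega
      have hEI : Ent ds L i = dOf ds i + 1 := by rw [Ent]; simp [h3i]
      have hEJ : Ent ds L j = dOf ds j + 1 := by rw [Ent]; simp [h3j]
      have := dMono ds hs i j hij hj
      omega

lemma ent_bound (ds : List Int) (L : Int) (hL : 1 ≤ L) :
    ∀ i, Ent ds L i ≤ ((ds.map Int.natAbs).sum : Int) + 1 + (i + 1) * L := by
  have hS : ∀ i, dOf ds i ≤ ((ds.map Int.natAbs).sum : Int) := by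
    intro i
    by_cases hi : i < ds.length
    · rw [dOf_eq ds i hi]
      have hmem : ds[i].natAbs ∈ ds.map Int.natAbs := by
        exact List.mem_map_of_mem (ds.getElem_mem hi)
      have h1 : ds[i].natAbs ≤ (ds.map Int.natAbs).sum :=
        List.single_le_sum (fun x _ => Nat.zero_le x) _ hmem
      have h2 : ds[i] ≤ (ds[i].natAbs : Int) := Int.le_natAbs
      exact le_trans h2 (by exact_mod_cast h1)
    · have hz : dOf ds i = 0 := by
        simp [dOf, List.getD_eq_getElem?_getD, List.getElem?_eq_none (by omega : ds.length ≤ i)]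
      rw [hz]
      exact_mod_cast Nat.zero_le _
  intro i
  induction i using Nat.strong_induction_on with
  | _ i ih =>
    by_cases h3 : 3 ≤ i
    · have hE : Ent ds L i = max (dOf ds i + 1) (Ent ds L (i - 3) + L) := by rw [Ent]; simp [h3]
      rw [hE]
      have hd := hS i
      have hrec := ih (i - 3) (by omega)
      have hcast : ((i - 3 : Nat) : Int) = (i : Int) - 3 := by push_cast [h3]; ring
      have hnn : (0:Int) ≤ ((i:Int) + 1) * L := mul_nonneg (by positivity) (by omega)
      apply max_le
      · linarith
      · rw [hcast] at hrec
        have hmul : ((i:Int) - 1) * L ≤ ((i:Int) + 1) * L :=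
          mul_le_mul_of_nonneg_right (by omega) (by omega)
        have he : ((i:Int) - 3 + 1) * L + L = ((i:Int) - 1) * L := by ring
        linarith
    · have hE : Ent ds L i = dOf ds i + 1 := by rw [Ent]; simp [h3]
      rw [hE]
      have hd := hS i
      have hnn : (0:Int) ≤ ((i:Int) + 1) * L := mul_nonneg (by positivity) (by omega)
      linarith

-- characterizations: the arrived/entered/finished index sets are prefixes
lemma aChar (ds : List Int) (hs : List.Pairwise (· ≤ ·) ds) (t : Int) (i : Nat)
    (hi : i < ds.length) : dOf ds i ≤ t ↔ i < aC ds t := by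
  have h := count_char ds.length (fun i => decide (dOf ds i ≤ t))
    (fun i j hij hj hpj => by
      simp only [decide_eq_true_eq] at *
      exact le_trans (dMono ds hs i j hij hj) hpj) i hi
  simpa [aC] using h

lemma bChar (ds : List Int) (L : Int) (hs : List.Pairwise (· ≤ ·) ds) (t : Int) (i : Nat)
    (hi : i < ds.length) : Ent ds L i ≤ t ↔ i < bC ds L t := by
  have h := count_char ds.length (fun i => decide (Ent ds L i ≤ t))
    (fun i j hij hj hpj => by
      simp only [decide_eq_true_eq] at *
      exact le_trans (ent_mono ds L hs j hj i hij) hpj) i hi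
  simpa [bC] using h

lemma cChar (ds : List Int) (L : Int) (hs : List.Pairwise (· ≤ ·) ds) (t : Int) (i : Nat)
    (hi : i < ds.length) : Ent ds L i + L ≤ t ↔ i < cC ds L t := by
  have h := count_char ds.length (fun i => decide (Ent ds L i + L ≤ t))
    (fun i j hij hj hpj => by
      simp only [decide_eq_true_eq] at *
      have := ent_mono ds L hs j hj i hij
      omega) i hi
  simpa [cC] using h

lemma aLe (ds : List Int) (t : Int) : aC ds t ≤ ds.length := by
  have := List.countP_le_length (l := List.range ds.length) (p := fun i => decide (dOf ds i ≤ t))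
  simpa [aC] using this

lemma bLe (ds : List Int) (L : Int) (t : Int) : bC ds L t ≤ ds.length := by
  have := List.countP_le_length (l := List.range ds.length) (p := fun i => decide (Ent ds L i ≤ t))
  simpa [bC] using this

lemma cLe (ds : List Int) (L : Int) (t : Int) : cC ds L t ≤ ds.length := by
  have := List.countP_le_length (l := List.range ds.length) (p := fun i => decide (Ent ds L i + L ≤ t))
  simpa [cC] using this

lemma countP_imp_le {l : List Nat} {p q : Nat → Bool} (h : ∀ a ∈ l, p a = true → q a = true) :
    l.countP p ≤ l.countP q := by
  induction l with
  | nil => simp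
  | cons x xs ih =>
    rw [List.countP_cons, List.countP_cons]
    have hx := h x (by simp)
    have hxs := ih (fun a ha hp => h a (by simp [ha]) hp)
    by_cases hp : p x = true
    · simp [hp, hx hp]; omega
    · have : p x = false := by simpa using hp
      simp [this]; omega

lemma aMono (ds : List Int) (t s : Int) (hts : t ≤ s) : aC ds t ≤ aC ds s := by
  exact countP_imp_le (fun a _ hp => by simp only [decide_eq_true_eq] at *; omega)

lemma bMono (ds : List Int) (L t s : Int) (hts : t ≤ s) : bC ds L t ≤ bC ds L s := by
  exact countP_imp_le (fun a _ hp => by simp only [decide_eq_true_eq] at *; omega)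

lemma cMono (ds : List Int) (L t s : Int) (hts : t ≤ s) : cC ds L t ≤ cC ds L s := by
  exact countP_imp_le (fun a _ hp => by simp only [decide_eq_true_eq] at *; omega)

lemma cLeB (ds : List Int) (L : Int) (hL : 1 ≤ L) (t : Int) : cC ds L t ≤ bC ds L t := by
  exact countP_imp_le (fun a _ hp => by simp only [decide_eq_true_eq] at *; omega)

lemma bLeA (ds : List Int) (L : Int) (t : Int) : bC ds L t ≤ aC ds t := by
  refine countP_imp_le (fun a _ hp => ?_)
  simp only [decide_eq_true_eq] at *
  have := ent_lb ds L a
  omega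

lemma bSuccLeA (ds : List Int) (L : Int) (t : Int) : bC ds L (t + 1) ≤ aC ds t := by
  refine countP_imp_le (fun a _ hp => ?_)
  simp only [decide_eq_true_eq] at *
  have := ent_lb ds L a
  omega

-- capacity: at most 3 persons between one entering and three-back finishing
lemma capB (ds : List Int) (L : Int) (hs : List.Pairwise (· ≤ ·) ds) (t : Int) :
    bC ds L t ≤ cC ds L t + 3 := by
  by_contra hcon
  set i := cC ds L t + 3 with hi
  have hib : i < bC ds L t := by omega
  have hin : i < ds.length := lt_of_lt_of_le hib (bLe ds L t)
  have h1 : Ent ds L i ≤ t := (bChar ds L hs t i hin).mpr hib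
  have h2 : Ent ds L (i - 3) + L ≤ t := le_trans (ent_step ds L i (by omega)) h1
  have h3 : i - 3 < cC ds L t := (cChar ds L hs t (i - 3) (by omega)).mp h2
  omega

-- the entry-count recurrence: b(t+1) = min (a t) (c(t+1) + 3)
lemma bRec (ds : List Int) (L : Int) (hs : List.Pairwise (· ≤ ·) ds) (t : Int) :
    bC ds L (t + 1) = min (aC ds t) (cC ds L (t + 1) + 3) := by
  have hub1 : bC ds L (t + 1) ≤ aC ds t := bSuccLeA ds L t
  have hub2 : bC ds L (t + 1) ≤ cC ds L (t + 1) + 3 := capB ds L hs (t + 1)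
  rcases Nat.lt_or_ge (bC ds L (t + 1)) (min (aC ds t) (cC ds L (t + 1) + 3)) with hlt | hge
  · exfalso
    set i := bC ds L (t + 1) with hidef
    have hia : i < aC ds t := by omega
    have hin : i < ds.length := lt_of_lt_of_le hia (aLe ds t)
    have hnotent : ¬ Ent ds L i ≤ t + 1 := by
      intro h
      have := (bChar ds L hs (t + 1) i hin).mp h
      omega
    have hdi : dOf ds i ≤ t := (aChar ds hs t i hin).mpr hia
    by_cases h3 : 3 ≤ i
    · have hic : i - 3 < cC ds L (t + 1) := by omega
      have hfin : Ent ds L (i - 3) + L ≤ t + 1 := (cChar ds L hs (t + 1) (i - 3) (by omega)).mpr hic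
      have hE : Ent ds L i = max (dOf ds i + 1) (Ent ds L (i - 3) + L) := by rw [Ent]; simp [h3]
      exact hnotent (by omega)
    · have hE : Ent ds L i = dOf ds i + 1 := by rw [Ent]; simp [h3]
      exact hnotent (by omega)
  · omega

lemma aZero (ds : List Int) (hd1 : ∀ x ∈ ds, 1 ≤ x) : aC ds 0 = 0 := by
  unfold aC
  rw [List.countP_eq_zero]
  intro i hi
  simp only [List.mem_range] at hi
  have := dPos ds hd1 i hi
  simp only [decide_eq_true_eq]
  omega

lemma bZero (ds : List Int) (L : Int) (hd1 : ∀ x ∈ ds, 1 ≤ x) : bC ds L 0 = 0 := by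
  unfold bC
  rw [List.countP_eq_zero]
  intro i hi
  simp only [List.mem_range] at hi
  have h1 := ent_lb ds L i
  have h2 := dPos ds hd1 i hi
  simp only [decide_eq_true_eq]
  omega

lemma cZero (ds : List Int) (L : Int) (hd1 : ∀ x ∈ ds, 1 ≤ x) (hL : 1 ≤ L) : cC ds L 0 = 0 := by
  unfold cC
  rw [List.countP_eq_zero]
  intro i hi
  simp only [List.mem_range] at hi
  have h1 := ent_lb ds L i
  have h2 := dPos ds hd1 i hi
  simp only [decide_eq_true_eq]
  omega

-- at t* = Ent (n-1) + L everyone has finished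
lemma counts_full (ds : List Int) (L : Int) (hs : List.Pairwise (· ≤ ·) ds) (hL : 1 ≤ L)
    (hn : 1 ≤ ds.length) :
    cC ds L (Ent ds L (ds.length - 1) + L) = ds.length ∧
    bC ds L (Ent ds L (ds.length - 1) + L) = ds.length ∧
    aC ds (Ent ds L (ds.length - 1) + L) = ds.length := by
  have hc : cC ds L (Ent ds L (ds.length - 1) + L) = ds.length := by
    unfold cC
    have h := (List.countP_eq_length (l := List.range ds.length)
        (p := fun i => decide (Ent ds L i + L ≤ Ent ds L (ds.length - 1) + L))).mpr ?_
    · simpa using h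
    · intro i hi
      simp only [List.mem_range] at hi
      simp only [decide_eq_true_eq]
      have := ent_mono ds L hs (ds.length - 1) (by omega) i (by omega)
      omega
  refine ⟨hc, ?_, ?_⟩
  · have h1 := cLeB ds L hL (Ent ds L (ds.length - 1) + L)
    have h2 := bLe ds L (Ent ds L (ds.length - 1) + L)
    omega
  · have h1 := cLeB ds L hL (Ent ds L (ds.length - 1) + L)
    have h2 := bLeA ds L (Ent ds L (ds.length - 1) + L)
    have h3 := aLe ds (Ent ds L (ds.length - 1) + L)
    omega

lemma popzA_replicate_append (k : Nat) (xs : List Int) :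
    popzA (List.replicate k 0 ++ xs) = popzA xs := by
  induction k with
  | zero => simp
  | succ k ih => simpa [List.replicate_succ, popzA] using ih

lemma popzA_pos (xs : List Int) (h : ∀ x ∈ xs, 0 < x) : popzA xs = xs := by
  cases xs with
  | nil => rfl
  | cons x xs =>
    have := h x (by simp)
    simp [popzA]
    omega

lemma transferA_spec : ∀ (w : Nat) (q : List Int) (L : Int), q.length ≤ 3 →
    transferA q (List.replicate w L) =
      (q ++ List.replicate (min w (3 - q.length)) L,
       List.replicate (w - min w (3 - q.length)) L) := by
  intro w
  induction w with
  | zero => intro q L h; simp [transferA]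
  | succ w ih =>
    intro q L h
    rw [List.replicate_succ]
    by_cases hq : q.length < 3
    · rw [transferA, if_pos hq, ih (q ++ [L]) L (by simp; omega)]
      have hlen : (q ++ [L]).length = q.length + 1 := by simp
      rw [hlen]
      have h1 : min (w + 1) (3 - q.length) = min w (3 - (q.length + 1)) + 1 := by omega
      rw [h1]
      have h2 : w + 1 - (min w (3 - (q.length + 1)) + 1) = w - min w (3 - (q.length + 1)) := by omega
      rw [h2]
      simp [List.replicate_succ, List.append_assoc]
    · rw [transferA, if_neg hq]
      have h1 : min (w + 1) (3 - q.length) = 0 := by omega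
      rw [h1]
      simp [List.replicate_succ]

lemma stepDistsA_fold (L : Int) : ∀ (dists accd accw : List Int),
    dists.foldl (fun p x => (p.1 ++ [x - 1], if x - 1 = 0 then p.2 ++ [L] else p.2)) (accd, accw)
      = (accd ++ dists.map (· - 1), accw ++ List.replicate ((dists.map (· - 1)).count 0) L) := by
  intro dists
  induction dists with
  | nil => intro accd accw; simp
  | cons x xs ih =>
    intro accd accw
    simp only [List.foldl_cons, List.map_cons]
    rw [ih]
    by_cases hx : x - 1 = 0
    · rw [if_pos hx]
      rw [List.count_cons]
      simp only [hx]
      simp [List.append_assoc]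
      rw [List.replicate_succ]
    · rw [if_neg hx]
      rw [List.count_cons]
      have : ((x - 1 : Int) == 0) = false := by simpa using hx
      simp [this]

lemma stepDistsA_spec (L : Int) (dists wait : List Int) :
    stepDistsA L dists wait =
      (dists.map (· - 1), wait ++ List.replicate ((dists.map (· - 1)).count 0) L) := by
  unfold stepDistsA
  rw [stepDistsA_fold]
  simp

lemma range'_split (s m k : Nat) (hmk : m ≤ k) :
    List.range' s k = List.range' s m ++ List.range' (s + m) (k - m) := by
  have h : List.range' s m 1 ++ List.range' (s + 1 * m) (k - m) 1 = List.range' s (m + (k - m)) 1 :=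
    List.range'_append
  rw [Nat.one_mul] at h
  rw [show m + (k - m) = k from by omega] at h
  exact h.symm

-- S1: decrement the stairway and pop the finishers
lemma queue_step (ds : List Int) (L : Int) (hs : List.Pairwise (· ≤ ·) ds) (hL : 1 ≤ L) (t : Nat) :
    popzA ((queueSt ds L t).map (· - 1)) =
      (List.range' (cC ds L ((t : Int) + 1)) (bC ds L (t : Int) - cC ds L ((t : Int) + 1))).map
        (fun i => Ent ds L i + L - ((t : Int) + 1)) := by
  have hcc' : cC ds L (t : Int) ≤ cC ds L ((t : Int) + 1) := cMono ds L _ _ (by omega)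
  have hc'b : cC ds L ((t : Int) + 1) ≤ bC ds L (t : Int) := by
    refine countP_imp_le (fun a _ hp => ?_)
    simp only [decide_eq_true_eq] at *
    omega
  set c := cC ds L (t : Int) with hcdef
  set c' := cC ds L ((t : Int) + 1) with hc'def
  set b := bC ds L (t : Int) with hbdef
  clear_value c c' b
  have hsplit : List.range' c (b - c) = List.range' c (c' - c) ++ List.range' c' (b - c') := by
    rw [range'_split c (c' - c) (b - c) (by omega),
        show c + (c' - c) = c' from by omega,
        show b - c - (c' - c) = b - c' from by omega]
  unfold queueSt
  rw [← hcdef, ← hbdef, hsplit, List.map_append, List.map_append, List.map_map, List.map_map]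
  have hzeros : (List.range' c (c' - c)).map ((· - 1) ∘ fun i => Ent ds L i + L - (t : Int))
      = List.replicate (c' - c) (0 : Int) := by
    rw [List.eq_replicate_iff]
    refine ⟨by simp, ?_⟩
    intro x hx
    obtain ⟨i, hi, hxi⟩ := List.mem_map.mp hx
    rw [List.mem_range'_1] at hi
    have hin : i < ds.length := by
      have := cLe ds L ((t : Int) + 1)
      omega
    have h1 : Ent ds L i + L ≤ (t : Int) + 1 := (cChar ds L hs _ i hin).mpr (by omega)
    have h2 : ¬ Ent ds L i + L ≤ (t : Int) := by
      intro hcon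
      have := (cChar ds L hs _ i hin).mp hcon
      omega
    simp only [Function.comp] at hxi
    omega
  rw [hzeros, popzA_replicate_append]
  have hpos : ∀ x ∈ (List.range' c' (b - c')).map ((· - 1) ∘ fun i => Ent ds L i + L - (t : Int)),
      0 < x := by
    intro x hx
    obtain ⟨i, hi, hxi⟩ := List.mem_map.mp hx
    rw [List.mem_range'_1] at hi
    have hin : i < ds.length := by
      have := bLe ds L (t : Int)
      omega
    have h2 : ¬ Ent ds L i + L ≤ (t : Int) + 1 := by
      intro hcon
      have := (cChar ds L hs _ i hin).mp hcon
      omega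
    simp only [Function.comp] at hxi
    omega
  rw [popzA_pos _ hpos]
  apply List.map_congr_left
  intro i _
  simp only [Function.comp]
  ring

-- S2: waiting persons step onto the stairway (capacity 3)
lemma transfer_step (ds : List Int) (L : Int) (hs : List.Pairwise (· ≤ ·) ds) (hL : 1 ≤ L) (t : Nat) :
    transferA
      ((List.range' (cC ds L ((t : Int) + 1)) (bC ds L (t : Int) - cC ds L ((t : Int) + 1))).map
        (fun i => Ent ds L i + L - ((t : Int) + 1)))
      (waitSt ds L t)
    = (queueSt ds L (t + 1), List.replicate (aC ds (t : Int) - bC ds L ((t : Int) + 1)) L) := by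
  have hc'b : cC ds L ((t : Int) + 1) ≤ bC ds L (t : Int) := by
    refine countP_imp_le (fun a _ hp => ?_)
    simp only [decide_eq_true_eq] at *
    omega
  have hcap : bC ds L (t : Int) ≤ cC ds L ((t : Int) + 1) + 3 := by
    have h1 := capB ds L hs (t : Int)
    have h2 := cMono ds L (t : Int) ((t : Int) + 1) (by omega)
    omega
  have hbb' : bC ds L (t : Int) ≤ bC ds L ((t : Int) + 1) := bMono ds L _ _ (by omega)
  have hba : bC ds L (t : Int) ≤ aC ds (t : Int) := bLeA ds L (t : Int)
  have hb'a : bC ds L ((t : Int) + 1) ≤ aC ds (t : Int) := bSuccLeA ds L (t : Int)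
  have hrec := bRec ds L hs (t : Int)
  set c' := cC ds L ((t : Int) + 1) with hc'def
  set b := bC ds L (t : Int) with hbdef
  set b' := bC ds L ((t : Int) + 1) with hb'def
  set a := aC ds (t : Int) with hadef
  clear_value c' b b' a
  have hqlen : ((List.range' c' (b - c')).map (fun i => Ent ds L i + L - ((t : Int) + 1))).length ≤ 3 := by
    simp; omega
  unfold waitSt
  rw [← hadef, ← hbdef]
  rw [transferA_spec (a - b) _ L hqlen]
  have hlen : ((List.range' c' (b - c')).map (fun i => Ent ds L i + L - ((t : Int) + 1))).length
      = b - c' := by simp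
  rw [hlen]
  have hm : min (a - b) (3 - (b - c')) = b' - b := by omega
  rw [hm, Prod.mk.injEq]
  refine ⟨?_, ?_⟩
  · -- queue part
    unfold queueSt
    push_cast
    rw [← hc'def, ← hb'def]
    have hsplit : List.range' c' (b' - c') = List.range' c' (b - c') ++ List.range' b (b' - b) := by
      rw [range'_split c' (b - c') (b' - c') (by omega),
          show c' + (b - c') = b from by omega,
          show b' - c' - (b - c') = b' - b from by omega]
    rw [hsplit, List.map_append]
    congr 1
    symm
    rw [List.eq_replicate_iff]
    refine ⟨by simp, ?_⟩
    intro x hx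
    obtain ⟨i, hi, hxi⟩ := List.mem_map.mp hx
    rw [List.mem_range'_1] at hi
    have hin : i < ds.length := by
      have := bLe ds L ((t : Int) + 1)
      omega
    have h1 : Ent ds L i ≤ (t : Int) + 1 := (bChar ds L hs _ i hin).mpr (by omega)
    have h2 : ¬ Ent ds L i ≤ (t : Int) := by
      intro hcon
      have := (bChar ds L hs _ i hin).mp hcon
      omega
    omega
  · -- wait part
    congr 1
    omega

-- the remaining road, split at the new arrivals
lemma drop_split_aux (ds : List Int) (a a' : Nat) (haa' : a ≤ a') :
    ds.drop a = (ds.drop a).take (a' - a) ++ ds.drop a' := by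
  conv_lhs => rw [← List.take_append_drop (a' - a) (ds.drop a)]
  congr 1
  rw [List.drop_drop]
  congr 1
  omega

lemma dists_split (ds : List Int) (hs : List.Pairwise (· ≤ ·) ds) (t : Nat) :
    (ds.drop (aC ds (t : Int))).map (· - ((t : Int) + 1))
      = List.replicate (aC ds ((t : Int) + 1) - aC ds (t : Int)) (0 : Int)
        ++ (ds.drop (aC ds ((t : Int) + 1))).map (· - ((t : Int) + 1)) := by
  have haa' : aC ds (t : Int) ≤ aC ds ((t : Int) + 1) := aMono ds _ _ (by omega)
  have ha'n : aC ds ((t : Int) + 1) ≤ ds.length := aLe ds _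
  rw [drop_split_aux ds (aC ds (t : Int)) (aC ds ((t : Int) + 1)) haa', List.map_append]
  congr 1
  rw [List.eq_replicate_iff]
  refine ⟨?_, ?_⟩
  · rw [List.length_map, List.length_take, List.length_drop]
    exact min_eq_left (by omega)
  intro x hx
  obtain ⟨y, hy, hxy⟩ := List.mem_map.mp hx
  obtain ⟨j, hj, hyj⟩ := List.mem_iff_getElem.mp hy
  have hjlen : j < aC ds ((t : Int) + 1) - aC ds (t : Int) := by
    have h5 := hj
    simp at h5
    omega
  have hjn : aC ds (t : Int) + j < ds.length := by omega
  have hval : y = ds[aC ds (t : Int) + j] := by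
    rw [← hyj]
    rw [List.getElem_take, List.getElem_drop]
  have h1 : dOf ds (aC ds (t : Int) + j) ≤ (t : Int) + 1 :=
    (aChar ds hs _ (aC ds (t : Int) + j) hjn).mpr (by omega)
  have h2 : ¬ dOf ds (aC ds (t : Int) + j) ≤ (t : Int) := by
    intro hcon
    have := (aChar ds hs _ (aC ds (t : Int) + j) hjn).mp hcon
    omega
  rw [dOf_eq ds (aC ds (t : Int) + j) hjn] at h1 h2
  omega

lemma dists_suffix_pos (ds : List Int) (hs : List.Pairwise (· ≤ ·) ds) (t : Nat) :
    ∀ x ∈ (ds.drop (aC ds ((t : Int) + 1))).map (· - ((t : Int) + 1)), 0 < x := by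
  intro x hx
  obtain ⟨y, hy, hxy⟩ := List.mem_map.mp hx
  obtain ⟨j, hj, hyj⟩ := List.mem_iff_getElem.mp hy
  set a' := aC ds ((t : Int) + 1) with ha'def
  have hjn : a' + j < ds.length := by
    have := hj
    simp at this
    omega
  have hval : y = ds[a' + j] := by rw [← hyj]; rw [List.getElem_drop]
  have h2 : ¬ dOf ds (a' + j) ≤ (t : Int) + 1 := by
    intro hcon
    have := (aChar ds hs _ (a' + j) hjn).mp hcon
    omega
  rw [dOf_eq ds (a' + j) hjn] at h2
  omega

-- S3: everyone walks one step towards the stairs; arrivals join the wait line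
lemma dists_step (ds : List Int) (L : Int) (hs : List.Pairwise (· ≤ ·) ds) (t : Nat) :
    stepDistsA L (distsSt ds t) (List.replicate (aC ds (t : Int) - bC ds L ((t : Int) + 1)) L)
      = ((ds.drop (aC ds (t : Int))).map (· - ((t : Int) + 1)), waitSt ds L (t + 1)) := by
  have haa' : aC ds (t : Int) ≤ aC ds ((t : Int) + 1) := aMono ds _ _ (by omega)
  have hb'a : bC ds L ((t : Int) + 1) ≤ aC ds (t : Int) := bSuccLeA ds L (t : Int)
  rw [stepDistsA_spec]
  unfold distsSt
  rw [List.map_map]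
  have hmm : (ds.drop (aC ds (t : Int))).map ((· - 1) ∘ (· - (t : Int)))
      = (ds.drop (aC ds (t : Int))).map (· - ((t : Int) + 1)) := by
    apply List.map_congr_left
    intro x _
    simp only [Function.comp]
    ring
  rw [hmm, Prod.mk.injEq]
  refine ⟨rfl, ?_⟩
  have hcount : ((ds.drop (aC ds (t : Int))).map (· - ((t : Int) + 1))).count 0
      = aC ds ((t : Int) + 1) - aC ds (t : Int) := by
    rw [dists_split ds hs t, List.count_append, List.count_replicate]
    have hzero : ((ds.drop (aC ds ((t : Int) + 1))).map (· - ((t : Int) + 1))).count 0 = 0 := by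
      rw [List.count_eq_zero]
      intro hmem
      have := dists_suffix_pos ds hs t 0 hmem
      omega
    rw [hzero]
    simp
  rw [hcount]
  unfold waitSt
  push_cast
  rw [← List.replicate_add]
  congr 1
  omega

-- S4: pop the persons who reached the stairs
lemma dists_pop (ds : List Int) (hs : List.Pairwise (· ≤ ·) ds) (t : Nat) :
    popzA ((ds.drop (aC ds (t : Int))).map (· - ((t : Int) + 1))) = distsSt ds (t + 1) := by
  rw [dists_split ds hs t, popzA_replicate_append, popzA_pos _ (dists_suffix_pos ds hs t)]
  unfold distsSt
  push_cast
  rfl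

-- the main loop runs exactly Ent (n-1) + L ticks
lemma loop_inv (ds : List Int) (L : Int) (hs : List.Pairwise (· ≤ ·) ds)
    (hL : 1 ≤ L) (hn : 1 ≤ ds.length) :
    ∀ (k t : Nat), (t : Int) ≤ Ent ds L (ds.length - 1) + L →
      Ent ds L (ds.length - 1) + L ≤ (t : Int) + (k : Int) →
      loopA L k (t : Int) (distsSt ds t) (queueSt ds L t) (waitSt ds L t)
        = Ent ds L (ds.length - 1) + L := by
  intro k
  induction k with
  | zero =>
    intro t h1 h2
    have h3 : (t : Int) = Ent ds L (ds.length - 1) + L := by push_cast at h2; omega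
    simpa [loopA] using h3
  | succ k ih =>
    intro t h1 h2
    by_cases hend : (t : Int) = Ent ds L (ds.length - 1) + L
    · obtain ⟨hcf, hbf, haf⟩ := counts_full ds L hs hL hn
      have ha : aC ds (t : Int) = ds.length := by rw [hend]; exact haf
      have hb : bC ds L (t : Int) = ds.length := by rw [hend]; exact hbf
      have hc : cC ds L (t : Int) = ds.length := by rw [hend]; exact hcf
      have hde : distsSt ds t = [] := by unfold distsSt; rw [ha]; simp
      have hqe : queueSt ds L t = [] := by unfold queueSt; rw [hb, hc]; simp
      have hwe : waitSt ds L t = [] := by unfold waitSt; rw [ha, hb]; simp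
      rw [loopA, hde, hqe, hwe]
      simp [hend]
    · have hlt : (t : Int) + 1 ≤ Ent ds L (ds.length - 1) + L := by omega
      have hne : ¬ (distsSt ds t = [] ∧ queueSt ds L t = [] ∧ waitSt ds L t = []) := by
        rintro ⟨hde, hqe, hwe⟩
        have ha : aC ds (t : Int) = ds.length := by
          have h5 := aLe ds (t : Int)
          unfold distsSt at hde
          have hlen := congrArg List.length hde
          simp at hlen
          omega
        have hb : bC ds L (t : Int) = ds.length := by
          have h5 := bLeA ds L (t : Int)
          unfold waitSt at hwe
          have hlen := congrArg List.length hwe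
          simp at hlen
          omega
        have hc : cC ds L (t : Int) = ds.length := by
          have h5 := cLeB ds L hL (t : Int)
          unfold queueSt at hqe
          have hlen := congrArg List.length hqe
          simp at hlen
          omega
        have hfin : Ent ds L (ds.length - 1) + L ≤ (t : Int) :=
          (cChar ds L hs (t : Int) (ds.length - 1) (by omega)).mpr (by omega)
        omega
      rw [loopA, if_neg hne]
      have s1 := queue_step ds L hs hL t
      have s2 := transfer_step ds L hs hL t
      have s3 := dists_step ds L hs t
      have s4 := dists_pop ds hs t
      simp only [s1, s2, s3, s4]
      have hc1 : ((t : Int) + 1) = ((t + 1 : Nat) : Int) := by push_cast; ring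
      rw [hc1]
      exact ih (t + 1) (by push_cast; omega) (by push_cast at h2 ⊢; omega)

-- B's fold builds exactly the entry times
lemma foldB_inv (ds : List Int) (L : Int) : ∀ (k m : Nat), m + k = ds.length →
    List.foldl
      (fun es p =>
        let e := p.2 + 1
        let e := if 3 ≤ p.1 ∧ e < es.getD (p.1 - 3).toNat 0 + L then es.getD (p.1 - 3).toNat 0 + L
                 else e
        es ++ [e])
      ((List.range m).map (Ent ds L))
      (PySem.List.enumerate (ds.drop m) (m : Int))
      = (List.range ds.length).map (Ent ds L) := by
  intro k
  induction k with
  | zero =>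
    intro m hm
    rw [show m = ds.length from by omega]
    simp
  | succ k ih =>
    intro m hm
    have hmn : m < ds.length := by omega
    rw [List.drop_eq_getElem_cons hmn, PySem.List.enumerate_cons, List.foldl_cons]
    have he : (let e := (((m : Int), ds[m]) : Int × Int).2 + 1;
        let e := if 3 ≤ (((m : Int), ds[m]) : Int × Int).1 ∧
              e < (List.map (Ent ds L) (List.range m)).getD
                    ((((m : Int), ds[m]) : Int × Int).1 - 3).toNat 0 + L then
            (List.map (Ent ds L) (List.range m)).getD
              ((((m : Int), ds[m]) : Int × Int).1 - 3).toNat 0 + L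
          else e;
        List.map (Ent ds L) (List.range m) ++ [e])
        = (List.range (m + 1)).map (Ent ds L) := by
      show ((List.range m).map (Ent ds L)) ++
          [if 3 ≤ (m : Int) ∧ ds[m] + 1 < ((List.range m).map (Ent ds L)).getD ((m : Int) - 3).toNat 0 + L
           then ((List.range m).map (Ent ds L)).getD ((m : Int) - 3).toNat 0 + L
           else ds[m] + 1]
        = (List.range (m + 1)).map (Ent ds L)
      rw [List.range_succ, List.map_append]
      congr 1
      simp only [List.map_cons, List.map_nil]
      congr 1
      have hdm : ds[m] = dOf ds m := (dOf_eq ds m hmn).symm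
      by_cases h3 : 3 ≤ m
      · have htn : ((m : Int) - 3).toNat = m - 3 := by omega
        have hgd : ((List.range m).map (Ent ds L)).getD (m - 3) 0 = Ent ds L (m - 3) := by
          rw [List.getD_eq_getElem _ _ (by simp; omega)]
          simp
        rw [htn, hgd, hdm]
        have hE : Ent ds L m = max (dOf ds m + 1) (Ent ds L (m - 3) + L) := by
          rw [Ent]; simp [h3]
        have h3i : (3 : Int) ≤ (m : Int) := by exact_mod_cast h3
        by_cases hcmp : dOf ds m + 1 < Ent ds L (m - 3) + L
        · rw [if_pos ⟨h3i, hcmp⟩, hE]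
          omega
        · rw [if_neg (by tauto), hE]
          omega
      · have h3i : ¬ (3 : Int) ≤ (m : Int) := by exact_mod_cast h3
        rw [if_neg (by tauto), hdm]
        rw [Ent]
        simp [h3]
    rw [he]
    rw [show (m : Int) + 1 = ((m + 1 : Nat) : Int) from by push_cast; ring]
    exact ih (m + 1) (by omega)

lemma loopA_nil (L : Int) (f : Nat) (timer : Int) : loopA L f timer [] [] [] = timer := by
  cases f <;> simp [loopA]

-- ===== VERDICT (by name: the statement is the Claim_ definition above) =====
theorem simulator_spec : Claim_equal_simulator := by
  unfold Claim_equal_simulator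
  intro group target hdom hpre
  unfold Spec_simulator
  obtain ⟨hlen, hLpos, hcoords⟩ := hpre
  have hslice : PySem.List.slice target (some 0) (some 2) = target.take 2 := by
    rw [PySem.List.slice_zero_start, show (2 : Int) = ((2 : Nat) : Int) from by norm_num]
    exact PySem.List.slice_to_natCast ..
  have htk : ∀ i : Nat, i < 2 → (target.take 2).getD i 0 = target.getD i 0 := by
    intro i hi
    rw [List.getD_eq_getElem _ _ (by simp; omega), List.getD_eq_getElem _ _ (by omega : i < target.length)]
    simp [List.getElem_take]
  have hmapeq : (group.map (fun coord => manhattanA coord (PySem.List.slice target (some 0) (some 2))))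
      = group.map (fun c => |c.getD 0 0 - target.getD 0 0| + |c.getD 1 0 - target.getD 1 0|) := by
    apply List.map_congr_left
    intro c _
    unfold manhattanA
    rw [hslice, htk 0 (by omega), htk 1 (by omega)]
  by_cases hg : group = []
  · subst hg
    unfold simulator simulator_alt
    rw [if_pos rfl]
    simp only [List.map_nil]
    rw [show PySem.List.sorted ([] : List Int) (fun x => x) false = [] from rfl]
    exact loopA_nil _ _ _
  · set L := target.getD 2 0 with hLdef
    set ds := PySem.List.sorted
        (group.map (fun c => |c.getD 0 0 - target.getD 0 0| + |c.getD 1 0 - target.getD 1 0|))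
        (fun x => x) false with hdsdef
    have hs : List.Pairwise (· ≤ ·) ds := by
      have := PySem.List.sorted_pairwise
        (xs := group.map (fun c => |c.getD 0 0 - target.getD 0 0| + |c.getD 1 0 - target.getD 1 0|))
        (key := fun x => x)
      simpa [← hdsdef] using this
    have hd1 : ∀ x ∈ ds, 1 ≤ x := by
      intro x hx
      rw [hdsdef, PySem.List.mem_sorted] at hx
      obtain ⟨c, hc, rfl⟩ := List.mem_map.mp hx
      exact (hcoords c hc).2
    have hL : 1 ≤ L := hLpos
    have hn : 1 ≤ ds.length := by
      rw [hdsdef, PySem.List.length_sorted, List.length_map]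
      cases group with
      | nil => exact absurd rfl hg
      | cons c cs => simp
  -- initial state of A's loop
    have h0d : distsSt ds 0 = ds := by
      unfold distsSt
      rw [Nat.cast_zero, aZero ds hd1]
      simp
    have h0q : queueSt ds L 0 = [] := by
      unfold queueSt
      rw [Nat.cast_zero, bZero ds L hd1, cZero ds L hd1 hL]
      simp
    have h0w : waitSt ds L 0 = [] := by
      unfold waitSt
      rw [Nat.cast_zero, aZero ds hd1, bZero ds L hd1]
      simp
  -- the fuel passed by A's port suffices
    have hfuel : Ent ds L (ds.length - 1) + L
        ≤ ((0 : Nat) : Int) + (((ds.map Int.natAbs).sum + (ds.length + 1) * L.natAbs + 1 : Nat) : Int) := by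
      have hbound := ent_bound ds L hL (ds.length - 1)
      have hcast1 : ((ds.length - 1 : Nat) : Int) = (ds.length : Int) - 1 := by omega
      rw [hcast1] at hbound
      have heq1 : ((ds.length : Int) - 1 + 1) * L = (ds.length : Int) * L := by ring
      rw [heq1] at hbound
      have hLabs : L ≤ (L.natAbs : Int) := Int.le_natAbs
      have hmul : (ds.length : Int) * L ≤ (ds.length : Int) * (L.natAbs : Int) :=
        mul_le_mul_of_nonneg_left hLabs (by positivity)
      have hexp : ((ds.length : Int) + 1) * (L.natAbs : Int)
          = (ds.length : Int) * (L.natAbs : Int) + (L.natAbs : Int) := by ring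
      push_cast at hbound hLabs hmul hexp ⊢
      linarith
    have hloop := loop_inv ds L hs hL hn
      ((ds.map Int.natAbs).sum + (ds.length + 1) * L.natAbs + 1) 0
      (by
        have h1 := ent_lb ds L (ds.length - 1)
        have h2 := dPos ds hd1 (ds.length - 1) (by omega)
        push_cast
        omega)
      hfuel
    rw [Nat.cast_zero, h0d, h0q, h0w] at hloop
    have hA : simulator group target = Ent ds L (ds.length - 1) + L := by
      unfold simulator
      simp only [hmapeq]
      rw [← hdsdef, ← hLdef]
      exact hloop
    have hB : simulator_alt group target = Ent ds L (ds.length - 1) + L := by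
      simp only [simulator_alt, if_neg hg]
      rw [← hdsdef, ← hLdef]
      have hfold := foldB_inv ds L ds.length 0 (by omega)
      simp only [List.range_zero, List.map_nil, List.drop_zero, Nat.cast_zero] at hfold
      rw [hfold]
      rw [List.getD_eq_getElem _ _ (by simp; omega)]
      simp

    rw [hA, hB]
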